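-- pv_equiv track=rewrite | github.com/YiweiHan/advent-of-code | 2025/day3/day3.py | find_
-- ===== SOURCE A (Python) =====
-- def find_(seq, l):
--     if not seq or l == 0:
--         return []
--     max_p_seq = max(seq[0:len(seq) - l + 1])
--     res = []
--
--     for i in range(0, len(seq) - l + 1):
--         if seq[i] != max_p_seq:
--             continue
--         d = seq[i]
--         r = seq[i+1:]
--         nexts = find_(r, l - 1)
--         if not nexts:
--             res.append([d])
--         else:
--             for nx in nexts:
--                 res.append([d] + nx)
--     return res
-- ===== SOURCE B (Python) =====
-- def find_(seq, l):
--     # Bottom-up DP over start indices with an on-the-fly suffix maximum: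
--     # row[start] (for level lev) = results of the subproblem (seq[start:], lev),
--     # computed right-to-left so each entry reuses its right neighbour.
--     n = len(seq)
--     if l <= 0 or l > n:
--         return []
--     prev = []
--     for lev in range(1, l + 1):
--         last = n - lev
--         row = []
--         pmax = None
--         for start in range(last, -1, -1):
--             x = seq[start]
--             if pmax is None:
--                 m = x
--                 entry = [[x]] if lev == 1 else [[x] + nx for nx in prev[start + 1]]
--             else:
--                 m = x if x > pmax else pmax
--                 if x != m:
--                     entry = row[0]
--                 else:
--                     piece = [[x]] if lev == 1 else [[x] + nx for nx in prev[start + 1]]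
--                     entry = piece + row[0] if pmax == m else piece
--             row = [entry] + row
--             pmax = m
--         prev = row
--     return prev[0]
-- ===== Notes on version B (the rewrite author's own statement) =====
-- stated objective: alternative
-- what changed: A's top-down recursion (which slices the list, rescans the window for its max and re-solves the same suffix subproblem once per occurrence) is replaced by a bottom-up dynamic program over (start index, length) filled right-to-left with an on-the-fly suffix maximum, so each suffix subproblem is solved once and each level needs a single sweep; total time stays dominated by the (possibly huge) output that both must build.
-- crash fix: A raises IndexError when l < 0 on a nonempty seq and ValueError (max() of an empty slice) when l = len(seq)+1 or l >= 2*len(seq)+1; B returns [] there. — e.g. on find_([1], 2): A raises ValueError, B returns []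
import Mathlib
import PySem

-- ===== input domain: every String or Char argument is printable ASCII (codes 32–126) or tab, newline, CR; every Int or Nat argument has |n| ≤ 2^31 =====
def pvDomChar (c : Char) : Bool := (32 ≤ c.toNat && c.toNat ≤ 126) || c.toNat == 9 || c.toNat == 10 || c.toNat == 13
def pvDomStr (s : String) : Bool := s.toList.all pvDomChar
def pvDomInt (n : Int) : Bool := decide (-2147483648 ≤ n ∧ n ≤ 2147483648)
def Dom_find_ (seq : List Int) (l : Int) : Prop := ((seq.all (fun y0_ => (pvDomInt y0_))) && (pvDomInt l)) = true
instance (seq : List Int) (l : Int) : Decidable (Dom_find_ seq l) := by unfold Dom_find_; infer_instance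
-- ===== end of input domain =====

-- B replaces A's top-down recursion (which re-slices, re-scans for the max and re-solves shared
-- suffix subproblems) by a bottom-up table over (start index, length) filled right-to-left with an
-- on-the-fly suffix maximum; same output-dominated cost (objective: alternative).

-- ===== PORT A =====
def find_ (seq : List Int) (l : Int) : List (List Int) :=
  if _h : seq = [] ∨ l = 0 then []
  else
    match PySem.List.max? (PySem.List.slice seq (some 0) (some ((seq.length : Int) - l + 1))) (fun y => y) with
    | none => []  -- Python raises ValueError (max of an empty slice) here
    | some m =>
      (List.range ((seq.length : Int) - l + 1).toNat).foldl
        (fun res (i : Nat) =>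
          match PySem.List.pyGet? seq (i : Int) with
          | none => res  -- Python raises IndexError here
          | some d =>
            if d ≠ m then res
            else
              let nexts := find_ (PySem.List.slice seq (some ((i : Int) + 1)) none) (l - 1)
              if nexts = [] then res ++ [[d]]
              else res ++ nexts.map (fun nx => d :: nx))
        []
termination_by seq.length
decreasing_by
  have hx : ((i : Int) + 1) = (((i + 1 : Nat) : Int)) := by push_cast; ring
  rw [hx, PySem.List.slice_from_natCast]
  have : seq ≠ [] := fun h => _h (Or.inl h)
  have : 0 < seq.length := List.length_pos_iff.mpr this
  simp [List.length_drop]; omega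

-- ===== PORT B =====
def pieceB (lev : Nat) (prev : List (List (List Int))) (start : Nat) (x : Int) : List (List Int) :=
  if lev = 1 then [[x]] else (prev.getD (start + 1) []).map (fun nx => x :: nx)

def bRow (seq : List Int) (lev : Nat) (prev : List (List (List Int))) (last : Nat) (start : Nat) :
    List (List (List Int)) × Int :=
  let x := seq.getD start 0
  if _h : last ≤ start then
    ([pieceB lev prev start x], x)
  else
    let rp := bRow seq lev prev last (start + 1)
    let p := rp.2
    let m := if x > p then x else p
    let entry :=
      if x ≠ m then rp.1.headD []
      else if p = m then pieceB lev prev start x ++ rp.1.headD []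
      else pieceB lev prev start x
    (entry :: rp.1, m)
termination_by last - start
decreasing_by omega

def bIter (seq : List Int) : Nat → List (List (List Int))
  | 0 => []
  | lev + 1 => (bRow seq (lev + 1) (bIter seq lev) (seq.length - (lev + 1)) 0).1

def find__alt (seq : List Int) (l : Int) : List (List Int) :=
  if l ≤ 0 ∨ (seq.length : Int) < l then []
  else (bIter seq l.toNat).headD []

-- ===== PRECONDITION & SPEC =====
-- Pre_ excludes exactly the inputs on which Python A raises: IndexError for l < 0 on a nonempty
-- seq, and ValueError (max() of an empty slice) for l = len+1 and for l ≥ 2*len+1; for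
-- len+2 ≤ l ≤ 2*len the negative slice bound makes A return [] and those inputs stay inside Pre_.
def Pre_find_ (seq : List Int) (l : Int) : Prop :=
  seq = [] ∨ l = 0 ∨ (1 ≤ l ∧ l ≤ seq.length) ∨ ((seq.length : Int) + 2 ≤ l ∧ l ≤ 2 * seq.length)
instance (seq : List Int) (l : Int) : Decidable (Pre_find_ seq l) := by unfold Pre_find_; infer_instance

def pvWitness_find_ : List Int × Int := ([2, 1, 2], 2)

-- A raises (IndexError or ValueError) whenever seq is nonempty and l < 0, l = len+1 or l ≥ 2*len+1; B returns [] there.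
def Raises_find_ (seq : List Int) (l : Int) : Prop :=
  seq ≠ [] ∧ (l < 0 ∨ l = (seq.length : Int) + 1 ∨ 2 * (seq.length : Int) + 1 ≤ l)
instance (seq : List Int) (l : Int) : Decidable (Raises_find_ seq l) := by unfold Raises_find_; infer_instance
def pvRaiseWitness_find_ : List Int × Int := ([1], 2)
def pvRaiseWitnessOut_find_ : List (List Int) := []

def Spec_find_ (seq : List Int) (l : Int) (out : List (List Int)) : Prop := out = find__alt seq l
instance (seq : List Int) (l : Int) (out : List (List Int)) : Decidable (Spec_find_ seq l out) := by unfold Spec_find_; infer_instance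

-- ===== CLAIM (what is proved, stated in full; the proofs are below) =====
def Claim_equal_find_ : Prop := ∀ (seq : List Int) (l : Int), Dom_find_ seq l → Pre_find_ seq l → Spec_find_ seq l (find_ seq l)
def Claim_raises_find_ : Prop := (∀ (seq : List Int) (l : Int), Dom_find_ seq l → Raises_find_ seq l → ¬ Pre_find_ seq l) ∧ (Dom_find_ (pvRaiseWitness_find_.1) (pvRaiseWitness_find_.2) ∧ Raises_find_ (pvRaiseWitness_find_.1) (pvRaiseWitness_find_.2) ∧ find__alt (pvRaiseWitness_find_.1) (pvRaiseWitness_find_.2) = pvRaiseWitnessOut_find_)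

-- ===== LEMMAS AND PROOFS =====

-- the window maximum max(seq[start : len-lev+1]) of A, as a running max
def Mw (seq : List Int) (lev start : Nat) : Int :=
  ((seq.drop (start + 1)).take (seq.length - lev - start)).foldl max (seq.getD start 0)

-- the contribution of one occurrence index i in A's loop
def pieceA (seq : List Int) (lev : Nat) (i : Nat) : List (List Int) :=
  let d := seq.getD i 0
  let nexts := find_ (seq.drop (i + 1)) ((lev : Int) - 1)
  if nexts = [] then [[d]] else nexts.map (fun nx => d :: nx)

lemma find_zero (seq : List Int) : find_ seq 0 = [] := by
  rw [find_]; simp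

lemma foldl_max_max (t : List Int) : ∀ a b : Int, t.foldl max (max a b) = max a (t.foldl max b) := by
  induction t with
  | nil => intro a b; rfl
  | cons c t ih =>
    intro a b
    simp only [List.foldl_cons]
    rw [max_assoc, ih]

lemma foldl_eq_flatMap {α : Type} (g : Nat → List α) (B : List α → Nat → List α) (k : Nat)
    (hB : ∀ res i, i < k → B res i = res ++ g i) :
    ∀ acc, (List.range k).foldl B acc = acc ++ (List.range k).flatMap g := by
  induction k with
  | zero => intro acc; simp
  | succ k ih =>
    intro acc
    rw [List.range_succ, List.foldl_append, List.flatMap_append,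
        ih (fun res i hi => hB res i (by omega)) acc]
    simp [hB _ k (by omega), List.append_assoc]

lemma Mw_last (seq : List Int) (lev start : Nat) (h : start + lev = seq.length) :
    Mw seq lev start = seq.getD start 0 := by
  unfold Mw
  have : seq.length - lev - start = 0 := by omega
  simp [this]

lemma Mw_rec (seq : List Int) (lev start : Nat) (hl : 1 ≤ lev) (h : start + lev < seq.length) :
    Mw seq lev start = max (seq.getD start 0) (Mw seq lev (start + 1)) := by
  unfold Mw
  have h1 : start + 1 < seq.length := by omega
  have hd : seq.drop (start + 1) = seq[start + 1] :: seq.drop (start + 2) :=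
    List.drop_eq_getElem_cons h1
  have hc : seq.length - lev - start = (seq.length - lev - (start + 1)) + 1 := by omega
  rw [hd, hc, List.take_succ_cons, List.foldl_cons,
      show seq[start + 1] = seq.getD (start + 1) 0 from (List.getD_eq_getElem seq 0 h1).symm]
  exact foldl_max_max _ _ _

lemma le_Mw (seq : List Int) (lev : Nat) (hl : 1 ≤ lev) :
    ∀ j start, start + j + lev ≤ seq.length → seq.getD (start + j) 0 ≤ Mw seq lev start := by
  intro j
  induction j with
  | zero =>
    intro start h
    rcases eq_or_lt_of_le h with h' | h'
    · rw [Mw_last seq lev start (by omega)]; simp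
    · rw [Mw_rec seq lev start hl (by omega)]; simp
  | succ j ih =>
    intro start h
    rw [Mw_rec seq lev start hl (by omega)]
    have := ih (start + 1) (by omega)
    calc seq.getD (start + (j + 1)) 0 = seq.getD ((start + 1) + j) 0 := by ring_nf
      _ ≤ Mw seq lev (start + 1) := this
      _ ≤ max (seq.getD start 0) (Mw seq lev (start + 1)) := le_max_right _ _

lemma Mw_attained (seq : List Int) (lev : Nat) (hl : 1 ≤ lev) :
    ∀ c start, start + c + lev = seq.length → ∃ j, j ≤ c ∧ seq.getD (start + j) 0 = Mw seq lev start := by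
  intro c
  induction c with
  | zero =>
    intro start h
    exact ⟨0, le_refl 0, by rw [Mw_last seq lev start (by omega)]; simp⟩
  | succ c ih =>
    intro start h
    rw [Mw_rec seq lev start hl (by omega)]
    rcases max_choice (seq.getD start 0) (Mw seq lev (start + 1)) with hm | hm
    · exact ⟨0, by omega, by rw [hm]; simp⟩
    · obtain ⟨j, hj, hje⟩ := ih (start + 1) (by omega)
      exact ⟨j + 1, by omega, by rw [hm, show start + (j + 1) = (start + 1) + j from by ring, hje]⟩

lemma find_drop_eq (seq : List Int) (lev start : Nat) (h1 : 1 ≤ lev) (h2 : start + lev ≤ seq.length) :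
    find_ (seq.drop start) (lev : Int) =
      (List.range (seq.length - lev - start + 1)).flatMap
        (fun j => if seq.getD (start + j) 0 = Mw seq lev start then pieceA seq lev (start + j) else []) := by
  have hstart : start < seq.length := by omega
  rw [find_]
  have hne : ¬(seq.drop start = [] ∨ (lev : Int) = 0) := by
    rintro (h | h)
    · have := congrArg List.length h; simp at this; omega
    · omega
  rw [dif_neg hne]
  have hlen : (seq.drop start).length = seq.length - start := List.length_drop
  have hcast : (((seq.drop start).length : Int) - lev + 1) = ((seq.length - start - lev + 1 : Nat) : Int) := by
    rw [hlen]; omega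
  have hc1' : seq.length - start - lev + 1 = (seq.length - lev - start) + 1 := by omega
  have hdrop : seq.drop start = seq[start] :: seq.drop (start + 1) := List.drop_eq_getElem_cons hstart
  have hMw : ((seq.drop (start + 1)).take (seq.length - lev - start)).foldl max seq[start] = Mw seq lev start := by
    unfold Mw
    rw [show seq.getD start 0 = seq[start] from List.getD_eq_getElem seq 0 hstart]
  have hmax : PySem.List.max? (PySem.List.slice (seq.drop start) (some 0) (some (((seq.drop start).length : Int) - lev + 1))) (fun y => y) = some (Mw seq lev start) := by
    rw [hcast, PySem.List.slice_zero_start, PySem.List.slice_to_natCast, hc1']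
    conv_lhs => rw [hdrop]
    rw [List.take_succ_cons, PySem.List.max?_id_cons, hMw]
  rw [hmax]
  simp only [hcast, Int.toNat_natCast, hc1']
  rw [foldl_eq_flatMap
      (fun j => if seq.getD (start + j) 0 = Mw seq lev start then pieceA seq lev (start + j) else []) _
      ((seq.length - lev - start) + 1) ?_ []]
  · simp
  · intro res i hi
    have hilt : i < (seq.drop start).length := by rw [hlen]; omega
    have hsi : start + i < seq.length := by omega
    simp only
    rw [PySem.List.pyGet?_natCast, List.getElem?_eq_getElem hilt]
    simp only
    have hgd : (seq.drop start)[i] = seq.getD (start + i) 0 := by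
      rw [List.getElem_drop, List.getD_eq_getElem seq 0 hsi]
    simp only [hgd]
    by_cases heq : seq.getD (start + i) 0 = Mw seq lev start
    · rw [if_neg (fun hc => hc heq), if_pos heq]
      have hslice : PySem.List.slice (seq.drop start) (some ((i : Int) + 1)) none = seq.drop ((start + i) + 1) := by
        rw [show ((i : Int) + 1) = (((i + 1 : Nat)) : Int) from by push_cast; ring,
            PySem.List.slice_from_natCast, List.drop_drop]
        ring_nf
      rw [hslice]
      unfold pieceA
      by_cases hnx : find_ (seq.drop (start + i + 1)) ((lev : Int) - 1) = [] <;>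
        simp [hnx]
    · rw [if_pos heq, if_neg heq]
      simp

lemma find_ne_nil (seq : List Int) (lev start : Nat) (h1 : 1 ≤ lev) (h2 : start + lev ≤ seq.length) :
    find_ (seq.drop start) (lev : Int) ≠ [] := by
  rw [find_drop_eq seq lev start h1 h2]
  obtain ⟨j, hj, hje⟩ := Mw_attained seq lev h1 (seq.length - lev - start) start (by omega)
  intro hnil
  rw [List.flatMap_eq_nil_iff] at hnil
  have hthis := hnil _ (List.mem_range.mpr (by omega : j < seq.length - lev - start + 1))
  rw [if_pos hje] at hthis
  unfold pieceA at hthis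
  by_cases hnx : find_ (seq.drop (start + j + 1)) ((lev : Int) - 1) = []
  · rw [if_pos hnx] at hthis; simp at hthis
  · rw [if_neg hnx] at hthis
    exact hnx (List.map_eq_nil_iff.mp hthis)

lemma find_step (seq : List Int) (lev start : Nat) (h1 : 1 ≤ lev) (h2 : start + lev ≤ seq.length) :
    find_ (seq.drop start) (lev : Int) =
      (if seq.getD start 0 = Mw seq lev start then pieceA seq lev start else []) ++
      (if start + lev < seq.length then
        (if Mw seq lev (start + 1) = Mw seq lev start then find_ (seq.drop (start + 1)) (lev : Int) else [])
       else []) := by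
  rw [find_drop_eq seq lev start h1 h2]
  rcases eq_or_lt_of_le h2 with hE | hL
  · have hc : seq.length - lev - start = 0 := by omega
    rw [hc, if_neg (by omega : ¬ start + lev < seq.length)]
    simp
  · have hc : seq.length - lev - start = (seq.length - lev - (start + 1)) + 1 := by omega
    rw [hc, if_pos hL, List.range_succ_eq_map, List.flatMap_cons]
    congr 1
    rw [List.flatMap_map]
    by_cases hM : Mw seq lev (start + 1) = Mw seq lev start
    · rw [if_pos hM, find_drop_eq seq lev (start + 1) h1 (by omega)]
      apply List.flatMap_congr
      intro j hj
      rw [show start + Nat.succ j = start + 1 + j from by omega, hM]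
    · rw [if_neg hM]
      apply List.flatMap_eq_nil_iff.mpr
      intro j hjmem
      rw [List.mem_range] at hjmem
      have hle : seq.getD (start + 1 + j) 0 ≤ Mw seq lev (start + 1) :=
        le_Mw seq lev h1 j (start + 1) (by omega)
      have hlt : Mw seq lev (start + 1) < Mw seq lev start := by
        have hrec := Mw_rec seq lev start h1 hL
        have hle2 : Mw seq lev (start + 1) ≤ Mw seq lev start := by
          rw [hrec]; exact le_max_right _ _
        exact lt_of_le_of_ne hle2 hM
      rw [if_neg (by rw [show start + Nat.succ j = start + 1 + j from by omega]; omega)]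

lemma pieceB_eq (seq : List Int) (lev start : Nat) (prev : List (List (List Int)))
    (h1 : 1 ≤ lev) (h2 : start + lev ≤ seq.length)
    (Hprev : 2 ≤ lev → ∀ j, j + (lev - 1) ≤ seq.length → prev.getD j [] = find_ (seq.drop j) ((lev : Int) - 1)) :
    pieceB lev prev start (seq.getD start 0) = pieceA seq lev start := by
  unfold pieceB pieceA
  by_cases hl1 : lev = 1
  · subst hl1
    rw [if_pos rfl, show ((1 : Nat) : Int) - 1 = 0 from by norm_num, find_zero]
    simp
  · have h2lev : 2 ≤ lev := by omega
    rw [if_neg hl1, Hprev h2lev (start + 1) (by omega)]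
    have hcast : ((lev : Int) - 1) = (((lev - 1 : Nat)) : Int) := by omega
    have hnn := find_ne_nil seq (lev - 1) (start + 1) (by omega) (by omega)
    rw [hcast] at *
    rw [if_neg hnn]

lemma bRow_spec (seq : List Int) (lev : Nat) (prev : List (List (List Int)))
    (h1 : 1 ≤ lev) (hln : lev ≤ seq.length)
    (Hprev : 2 ≤ lev → ∀ j, j + (lev - 1) ≤ seq.length → prev.getD j [] = find_ (seq.drop j) ((lev : Int) - 1)) :
    ∀ c start, start + c = seq.length - lev →
      (bRow seq lev prev (seq.length - lev) start).1 =
        (List.range (c + 1)).map (fun j => find_ (seq.drop (start + j)) (lev : Int)) ∧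
      (bRow seq lev prev (seq.length - lev) start).2 = Mw seq lev start := by
  intro c
  induction c with
  | zero =>
    intro start hst
    rw [bRow]
    simp only [dif_pos (show seq.length - lev ≤ start by omega)]
    have hMl := Mw_last seq lev start (by omega)
    refine ⟨?_, by simpa using hMl.symm⟩
    rw [show (0 : Nat) + 1 = 1 from rfl, List.range_one]
    simp only [List.map_cons, List.map_nil, Nat.add_zero]
    rw [pieceB_eq seq lev start prev h1 (by omega) Hprev,
        find_step seq lev start h1 (by omega),
        if_neg (by omega : ¬ start + lev < seq.length),
        if_pos (by rw [hMl])]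
    simp
  | succ c ih =>
    intro start hst
    rw [bRow]
    simp only [dif_neg (show ¬ seq.length - lev ≤ start by omega)]
    obtain ⟨ihrow, ihmax⟩ := ih (start + 1) (by omega)
    have hL : start + lev < seq.length := by omega
    have hm : (if seq.getD start 0 > (bRow seq lev prev (seq.length - lev) (start + 1)).2
        then seq.getD start 0 else (bRow seq lev prev (seq.length - lev) (start + 1)).2)
        = Mw seq lev start := by
      rw [ihmax, Mw_rec seq lev start h1 hL, Int.max_def]
      split_ifs <;> omega
    have hhead : (bRow seq lev prev (seq.length - lev) (start + 1)).1.headD []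
        = find_ (seq.drop (start + 1)) (lev : Int) := by
      rw [ihrow, List.range_succ_eq_map]
      simp
    have hstep := find_step seq lev start h1 (by omega)
    rw [if_pos hL] at hstep
    have hentry : (if seq.getD start 0 ≠ Mw seq lev start
        then (bRow seq lev prev (seq.length - lev) (start + 1)).1.headD []
        else if (bRow seq lev prev (seq.length - lev) (start + 1)).2 = Mw seq lev start
          then pieceB lev prev start (seq.getD start 0) ++ (bRow seq lev prev (seq.length - lev) (start + 1)).1.headD []
          else pieceB lev prev start (seq.getD start 0))
        = find_ (seq.drop start) (lev : Int) := by
      rw [ihmax, hhead, pieceB_eq seq lev start prev h1 (by omega) Hprev]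
      by_cases hx : seq.getD start 0 = Mw seq lev start
      · rw [if_neg (fun hcon => hcon hx)]
        by_cases hp : Mw seq lev (start + 1) = Mw seq lev start
        · rw [if_pos hp, hstep, if_pos hx, if_pos hp]
        · rw [if_neg hp, hstep, if_pos hx, if_neg hp, List.append_nil]
      · rw [if_pos hx, hstep, if_neg hx]
        have hp : Mw seq lev (start + 1) = Mw seq lev start := by
          have hrec := Mw_rec seq lev start h1 hL
          rcases max_choice (seq.getD start 0) (Mw seq lev (start + 1)) with hmc | hmc <;>
            rw [hrec] <;> omega
        rw [if_pos hp]
        simp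
    refine ⟨?_, hm⟩
    rw [hm, hentry, ihrow]
    conv_rhs => rw [List.range_succ_eq_map (n := c + 1)]
    simp only [List.map_cons, List.map_map, Nat.add_zero]
    congr 1
    apply List.map_congr_left
    intro j hj
    simp only [Function.comp]
    rw [show start + Nat.succ j = start + 1 + j from by omega]

lemma bIter_spec (seq : List Int) :
    ∀ lev, 1 ≤ lev → lev ≤ seq.length →
      ∀ j, j + lev ≤ seq.length → (bIter seq lev).getD j [] = find_ (seq.drop j) (lev : Int) := by
  intro lev
  induction lev with
  | zero => omega
  | succ lev ih =>
    intro _h1 hln j hj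
    have Hprev : 2 ≤ lev + 1 → ∀ j, j + (lev + 1 - 1) ≤ seq.length →
        (bIter seq lev).getD j [] = find_ (seq.drop j) (((lev + 1 : Nat) : Int) - 1) := by
      intro h2 j2 hj2
      have he : lev + 1 - 1 = lev := rfl
      rw [he] at hj2
      rw [ih (by omega) (by omega) j2 hj2]
      congr 1
      push_cast
      ring
    obtain ⟨hrow, _⟩ := bRow_spec seq (lev + 1) (bIter seq lev) (by omega) (by omega) Hprev
      (seq.length - (lev + 1)) 0 (by omega)
    rw [bIter, hrow]
    rw [List.getD_eq_getElem?_getD, List.getElem?_map,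
        List.getElem?_range (by omega : j < seq.length - (lev + 1) + 1)]
    simp

-- ===== VERDICT (by name: the statement is the Claim_ definition above) =====
lemma headD_eq_getD_zero {α : Type} (xs : List α) (d : α) : xs.headD d = xs.getD 0 d := by
  cases xs <;> rfl

theorem find__spec : Claim_equal_find_ := by
  intro seq l _hdom hpre
  unfold Spec_find_
  rcases hpre with h | h | ⟨ha, hb⟩ | ⟨ha, hb⟩
  · subst h
    rw [find_, dif_pos (Or.inl rfl)]
    unfold find__alt
    rw [if_pos (by simp; omega)]
  · subst h
    rw [find_zero]
    unfold find__alt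
    rw [if_pos (Or.inl (le_refl 0))]
  · have hlev : ((l.toNat : Nat) : Int) = l := Int.toNat_of_nonneg (by omega)
    have h1l : 1 ≤ l.toNat := by omega
    have hln : l.toNat ≤ seq.length := by omega
    unfold find__alt
    rw [if_neg (by rintro (hc | hc) <;> omega)]
    rw [headD_eq_getD_zero, bIter_spec seq l.toNat h1l hln 0 (by omega), List.drop_zero, hlev]
  · have hn2 : 2 ≤ seq.length := by omega
    unfold find__alt
    rw [if_pos (Or.inr (by omega))]
    rw [find_, dif_neg (by
      rintro (hc | hc)
      · rw [hc] at hn2; simp at hn2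
      · omega)]
    split
    · rfl
    · rw [show ((seq.length : Int) - l + 1).toNat = 0 from by omega]
      simp

theorem find__raises : Claim_raises_find_ := by
  unfold Claim_raises_find_
  constructor
  · rintro seq l _hdom ⟨hne, hc⟩ hpre
    have hlen : 0 < seq.length := List.length_pos_iff.mpr hne
    rcases hpre with h | h | ⟨ha, hb⟩ | ⟨ha, hb⟩
    · exact hne h
    · rcases hc with hc | hc | hc <;> omega
    · rcases hc with hc | hc | hc <;> omega
    · rcases hc with hc | hc | hc <;> omega
  · refine ⟨by decide, by decide, by decide⟩

-- self-check: the stated raise-witness really lies inside Raises_find_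
theorem pvRaiseWitness_find__ok :
    Raises_find_ (pvRaiseWitness_find_.1) (pvRaiseWitness_find_.2) :=
  find__raises.2.2.1
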